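-- pv_equiv track=rewrite | github.com/mgtezak/Advent_of_Code | 2016/06/p1.py | part1
-- ===== SOURCE A (Python) =====
-- def part1(puzzle_input):
--     lines = [line for line in puzzle_input.split('\n')]
--     msg = ''
--     for i in range(len(lines[0])):
--         letters = [line[i] for line in lines]
--         most_freq = sorted((letters.count(l), l) for l in letters)[-1][1]
--         msg += most_freq
--     return msg
-- ===== SOURCE B (Python) =====
-- def part1(puzzle_input):
--     lines = puzzle_input.split('\n')
--     counts = [{} for _ in range(len(lines[0]))]
--     for line in lines:
--         for i, d in enumerate(counts):
--             ch = line[i]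
--             d[ch] = d.get(ch, 0) + 1
--     return ''.join(max(d, key=lambda c: (d[c], c)) for d in counts)
-- ===== Notes on version B (the rewrite author's own statement) =====
-- stated objective: alternative
-- what changed: A rescans each column once per character (list.count for every element) and then sorts the (count,letter) pairs; B makes a single row-major pass building one count dictionary per column and then picks each column's max key by (count, letter), removing the per-element rescan and the sort (it trades A's two-phase per-column scan for a table of counters plus a max extraction).
import Mathlib
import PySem

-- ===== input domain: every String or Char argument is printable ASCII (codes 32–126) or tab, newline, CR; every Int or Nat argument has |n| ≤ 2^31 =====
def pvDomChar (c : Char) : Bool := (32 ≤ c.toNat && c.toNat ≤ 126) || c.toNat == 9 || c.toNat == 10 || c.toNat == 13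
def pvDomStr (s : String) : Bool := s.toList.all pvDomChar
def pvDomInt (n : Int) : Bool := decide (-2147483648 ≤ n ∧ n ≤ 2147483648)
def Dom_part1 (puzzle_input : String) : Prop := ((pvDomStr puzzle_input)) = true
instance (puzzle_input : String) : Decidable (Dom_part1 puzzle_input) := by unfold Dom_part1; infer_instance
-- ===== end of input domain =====

-- B replaces A's per-column rescan (list.count per element + sort) by one row-major
-- counting pass into per-column dictionaries followed by a max-by-(count,letter)
-- extraction: a different algorithm with the same result.


-- ===== PORT A =====
-- line[i] is ported as pyGetD with default ' '; Pre_part1 restricts to the inputs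
-- where every such index is in range (outside them Python raises IndexError).
def part1 (puzzle_input : String) : String :=
  let lines := PySem.Chars.splitOn puzzle_input.toList ['\n']
  let msg := (PySem.List.pyRange 0 (PySem.List.len (PySem.List.pyGetD lines 0 [])) 1).foldl
    (fun msg i =>
      let letters := lines.map (fun line => PySem.List.pyGetD line i ' ')
      let most_freq := (PySem.List.pyGetD
        (PySem.List.sorted2 (letters.map (fun l => ((PySem.List.count letters l : Int), l)))
          Prod.fst Prod.snd) (-1) (0, ' ')).2
      msg ++ [most_freq]) ([] : List Char)
  String.ofList msg

-- ===== PORT B =====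
def part1_alt (puzzle_input : String) : String :=
  let lines := PySem.Chars.splitOn puzzle_input.toList ['\n']
  let width := PySem.List.len (PySem.List.pyGetD lines 0 [])
  let counts : List (PySem.Dict Char Int) :=
    (PySem.List.pyRange 0 width 1).map (fun _ => PySem.Dict.empty)
  let counts := lines.foldl
    (fun counts line =>
      (PySem.List.enumerate counts).map (fun p =>
        let ch := PySem.List.pyGetD line p.1 ' '
        p.2.insert ch (p.2.getD ch 0 + 1))) counts
  String.ofList (counts.map (fun d =>
    (PySem.List.max2? d.keys (fun ch => d.getD ch 0) (fun ch => ch)).getD ' '))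

-- ===== PRECONDITION & SPEC =====
-- Pre_part1: every line is at least as long as the first line — exactly the inputs
-- on which Python A returns (otherwise line[i] raises IndexError).
def Pre_part1 (puzzle_input : String) : Prop :=
  ∀ line ∈ PySem.Chars.splitOn puzzle_input.toList ['\n'],
    (PySem.List.pyGetD (PySem.Chars.splitOn puzzle_input.toList ['\n']) 0 []).length ≤ line.length
instance (puzzle_input : String) : Decidable (Pre_part1 puzzle_input) := by unfold Pre_part1; infer_instance
def pvWitness_part1 : String := "eedadn\ndrvtee\neandsr"
def Spec_part1 (puzzle_input : String) (out : String) : Prop := out = part1_alt puzzle_input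
instance (puzzle_input : String) (out : String) : Decidable (Spec_part1 puzzle_input out) := by unfold Spec_part1; infer_instance

-- ===== CLAIM (what is proved, stated in full; the proofs are below) =====
def Claim_equal_part1 : Prop := ∀ (puzzle_input : String), Dom_part1 puzzle_input → Pre_part1 puzzle_input → Spec_part1 puzzle_input (part1 puzzle_input)

-- ===== LEMMAS AND PROOFS =====

-- The strict "comes before" test that both sorted2 and max2? use on the
-- lexicographic key pair (k1 x, k2 x), and its reading as the Lex order.
def pvBefore {α κ₁ κ₂ : Type} [LinearOrder κ₁] [LinearOrder κ₂]
    (k1 : α → κ₁) (k2 : α → κ₂) (a b : α) : Bool :=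
  decide (k1 a < k1 b) || (!decide (k1 b < k1 a) && decide (k2 a < k2 b))

def pvKey {α κ₁ κ₂ : Type} (k1 : α → κ₁) (k2 : α → κ₂) (a : α) : Lex (κ₁ × κ₂) :=
  toLex (k1 a, k2 a)

theorem pvBefore_true_iff {α κ₁ κ₂ : Type} [LinearOrder κ₁] [LinearOrder κ₂]
    (k1 : α → κ₁) (k2 : α → κ₂) (a b : α) :
    pvBefore k1 k2 a b = true ↔ pvKey k1 k2 a < pvKey k1 k2 b := by
  simp only [pvBefore, pvKey, Prod.Lex.lt_iff, ofLex_toLex, Bool.or_eq_true, Bool.and_eq_true,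
    Bool.not_eq_true', decide_eq_true_eq, decide_eq_false_iff_not]
  constructor
  · rintro (h | ⟨h1, h2⟩)
    · exact Or.inl h
    · rcases lt_trichotomy (k1 a) (k1 b) with h' | h' | h'
      · exact Or.inl h'
      · exact Or.inr ⟨h', h2⟩
      · exact absurd h' h1
  · rintro (h | ⟨h1, h2⟩)
    · exact Or.inl h
    · exact Or.inr ⟨by rw [h1]; exact lt_irrefl _, h2⟩

theorem pvBefore_false_iff {α κ₁ κ₂ : Type} [LinearOrder κ₁] [LinearOrder κ₂]
    (k1 : α → κ₁) (k2 : α → κ₂) (a b : α) :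
    pvBefore k1 k2 a b = false ↔ pvKey k1 k2 b ≤ pvKey k1 k2 a := by
  rw [Bool.eq_false_iff, ne_eq, pvBefore_true_iff, not_lt]

-- insertBy with pvBefore preserves key-sortedness
theorem insertBy_pairwise {α κ₁ κ₂ : Type} [LinearOrder κ₁] [LinearOrder κ₂]
    (k1 : α → κ₁) (k2 : α → κ₂) (x : α) :
    ∀ (acc : List α), acc.Pairwise (fun a b => pvKey k1 k2 a ≤ pvKey k1 k2 b) →
      (PySem.List.insertBy (pvBefore k1 k2) x acc).Pairwise
        (fun a b => pvKey k1 k2 a ≤ pvKey k1 k2 b) := by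
  intro acc
  induction acc with
  | nil => intro _; simp [PySem.List.insertBy]
  | cons y ys ih =>
    intro h
    rw [List.pairwise_cons] at h
    show (if pvBefore k1 k2 x y = true then x :: y :: ys else
        y :: PySem.List.insertBy (pvBefore k1 k2) x ys).Pairwise _
    by_cases hb : pvBefore k1 k2 x y = true
    · rw [if_pos hb]
      rw [pvBefore_true_iff] at hb
      refine List.pairwise_cons.2 ⟨?_, List.pairwise_cons.2 h⟩
      intro z hz
      rcases List.mem_cons.1 hz with rfl | hz
      · exact le_of_lt hb
      · exact le_trans (le_of_lt hb) (h.1 z hz)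
    · rw [if_neg hb]
      rw [Bool.not_eq_true, pvBefore_false_iff] at hb
      refine List.pairwise_cons.2 ⟨?_, ih h.2⟩
      intro z hz
      rcases (PySem.List.mem_insertBy _ x z ys).1 hz with rfl | hz
      · exact hb
      · exact h.1 z hz

theorem foldl_insertBy_pairwise {α κ₁ κ₂ : Type} [LinearOrder κ₁] [LinearOrder κ₂]
    (k1 : α → κ₁) (k2 : α → κ₂) :
    ∀ (xs acc : List α), acc.Pairwise (fun a b => pvKey k1 k2 a ≤ pvKey k1 k2 b) →
      (xs.foldl (fun acc x => PySem.List.insertBy (pvBefore k1 k2) x acc) acc).Pairwise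
        (fun a b => pvKey k1 k2 a ≤ pvKey k1 k2 b) := by
  intro xs
  induction xs with
  | nil => intro acc h; exact h
  | cons x t ih => intro acc h; exact ih _ (insertBy_pairwise k1 k2 x acc h)

theorem sorted2_pairwise_key {α κ₁ κ₂ : Type} [LinearOrder κ₁] [LinearOrder κ₂]
    (xs : List α) (k1 : α → κ₁) (k2 : α → κ₂) :
    (PySem.List.sorted2 xs k1 k2).Pairwise (fun a b => pvKey k1 k2 a ≤ pvKey k1 k2 b) := by
  have : PySem.List.sorted2 xs k1 k2 =
      xs.foldl (fun acc x => PySem.List.insertBy (pvBefore k1 k2) x acc) [] := rfl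
  rw [this]
  exact foldl_insertBy_pairwise k1 k2 xs [] List.Pairwise.nil

-- the last element of a key-sorted list is key-maximal
theorem pairwise_getLast_max {α κ : Type} [LinearOrder κ] (key : α → κ)
    (l : List α) (h : l.Pairwise (fun a b => key a ≤ key b)) (hne : l ≠ []) :
    ∀ a ∈ l, key a ≤ key (l.getLast hne) := by
  intro a ha
  rw [List.pairwise_iff_getElem] at h
  rcases List.mem_iff_getElem.1 ha with ⟨i, hi, rfl⟩
  rw [List.getLast_eq_getElem]
  rcases Nat.lt_or_ge i (l.length - 1) with hlt | hge
  · exact h i (l.length - 1) hi (by omega) hlt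
  · have : i = l.length - 1 := by omega
    subst this; exact le_refl _

-- max2? of a nonempty list returns a key-maximal member
theorem max2?_foldl_spec {α κ₁ κ₂ : Type} [LinearOrder κ₁] [LinearOrder κ₂]
    (k1 : α → κ₁) (k2 : α → κ₂) :
    ∀ (t : List α) (m0 : α),
      ∃ m, (t.foldl (fun acc x =>
          match acc with
          | none => some x
          | some m =>
            if (decide (k1 m < k1 x) || !decide (k1 x < k1 m) && decide (k2 m < k2 x)) = true
            then some x else some m) (some m0)) = some m ∧
        (m = m0 ∨ m ∈ t) ∧ pvKey k1 k2 m0 ≤ pvKey k1 k2 m ∧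
        ∀ y ∈ t, pvKey k1 k2 y ≤ pvKey k1 k2 m := by
  intro t
  induction t with
  | nil => intro m0; exact ⟨m0, rfl, Or.inl rfl, le_refl _, by simp⟩
  | cons x t ih =>
    intro m0
    show ∃ m, (t.foldl _ (if pvBefore k1 k2 m0 x = true then some x else some m0)) = some m ∧ _
    by_cases hb : pvBefore k1 k2 m0 x = true
    · rw [if_pos hb]
      rw [pvBefore_true_iff] at hb
      rcases ih x with ⟨m, hm, hmem, hle, hall⟩
      refine ⟨m, hm, ?_, le_trans (le_of_lt hb) hle, ?_⟩
      · rcases hmem with rfl | hmem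
        · exact Or.inr List.mem_cons_self
        · exact Or.inr (List.mem_cons_of_mem _ hmem)
      · intro y hy
        rcases List.mem_cons.1 hy with rfl | hy
        · exact hle
        · exact hall y hy
    · rw [if_neg hb]
      rw [Bool.not_eq_true, pvBefore_false_iff] at hb
      rcases ih m0 with ⟨m, hm, hmem, hle, hall⟩
      refine ⟨m, hm, ?_, hle, ?_⟩
      · rcases hmem with rfl | hmem
        · exact Or.inl rfl
        · exact Or.inr (List.mem_cons_of_mem _ hmem)
      · intro y hy
        rcases List.mem_cons.1 hy with rfl | hy
        · exact le_trans hb hle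
        · exact hall y hy

theorem max2?_spec_ne_nil {α κ₁ κ₂ : Type} [LinearOrder κ₁] [LinearOrder κ₂]
    (k1 : α → κ₁) (k2 : α → κ₂) (xs : List α) (hne : xs ≠ []) :
    ∃ m, PySem.List.max2? xs k1 k2 = some m ∧ m ∈ xs ∧
      ∀ y ∈ xs, pvKey k1 k2 y ≤ pvKey k1 k2 m := by
  rcases xs with _ | ⟨x, t⟩
  · exact absurd rfl hne
  rcases max2?_foldl_spec k1 k2 t x with ⟨m, hm, hmem, hle, hall⟩
  refine ⟨m, hm, ?_, ?_⟩
  · rcases hmem with rfl | hmem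
    · exact List.mem_cons_self
    · exact List.mem_cons_of_mem _ hmem
  · intro y hy
    rcases List.mem_cons.1 hy with rfl | hy
    · exact hle
    · exact hall y hy

-- ===== the per-column extraction lemma =====
-- For any list of column letters, A's column result (last of the stable sort of
-- (count, letter) pairs) equals B's (max key of the counter by (count, letter)).
theorem column_eq (letters : List Char) :
    (PySem.List.pyGetD
        (PySem.List.sorted2 (letters.map (fun l => ((PySem.List.count letters l : Int), l)))
          Prod.fst Prod.snd) (-1) (0, ' ')).2 =
      (PySem.List.max2? (PySem.Dict.counter letters).keys
          (fun ch => (PySem.Dict.counter letters).getD ch 0) (fun ch => ch)).getD ' ' := by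
  rcases hlet : letters with _ | ⟨c0, t0⟩
  · decide
  rw [← hlet]
  have hlne : letters ≠ [] := by rw [hlet]; exact List.cons_ne_nil _ _
  set pairs : List (Int × Char) :=
    letters.map (fun l => ((PySem.List.count letters l : Int), l)) with hpairs
  have hperm := PySem.List.sorted2_perm pairs Prod.fst Prod.snd false
  have hsne : PySem.List.sorted2 pairs Prod.fst Prod.snd ≠ [] := by
    intro h
    have := hperm.length_eq
    rw [h] at this
    simp only [List.length_nil] at this
    rw [hpairs, hlet] at this
    simp at this
  rw [PySem.List.pyGetD_neg_one _ _ hsne]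
  -- A's last element
  set L := (PySem.List.sorted2 pairs Prod.fst Prod.snd).getLast hsne with hL
  have hLmemS : L ∈ PySem.List.sorted2 pairs Prod.fst Prod.snd := List.getLast_mem hsne
  have hLmem : L ∈ pairs := hperm.mem_iff.1 hLmemS
  obtain ⟨l0, hl0mem, hl0eq⟩ := List.mem_map.1 hLmem
  have hLmax : ∀ p ∈ pairs, pvKey Prod.fst Prod.snd p ≤ pvKey Prod.fst Prod.snd L := by
    intro p hp
    exact pairwise_getLast_max _ _ (sorted2_pairwise_key pairs Prod.fst Prod.snd) hsne p
      (hperm.mem_iff.2 hp)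
  -- B's max element
  have hkne : (PySem.Dict.counter letters).keys ≠ [] := by
    rw [PySem.Dict.keys_counter]
    intro h
    have : c0 ∈ PySem.Set.ofList letters := (PySem.Set.mem_ofList letters c0).2 (by rw [hlet]; exact List.mem_cons_self)
    rw [h] at this
    exact List.not_mem_nil this
  obtain ⟨m, hmeq, hmmem, hmax⟩ := max2?_spec_ne_nil
    (fun ch => (PySem.Dict.counter letters).getD ch 0) (fun ch => (ch : Char))
    (PySem.Dict.counter letters).keys hkne
  rw [hmeq, Option.getD_some]
  have hmlet : m ∈ letters := (PySem.Set.mem_ofList letters m).1 (by rw [← PySem.Dict.keys_counter]; exact hmmem)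
  -- compare the two maximal elements
  have h1 : pvKey Prod.fst Prod.snd ((PySem.List.count letters m : Int), m) ≤
      pvKey Prod.fst Prod.snd L :=
    hLmax _ (List.mem_map.2 ⟨m, hmlet, rfl⟩)
  have h2 : pvKey (fun ch => (PySem.Dict.counter letters).getD ch 0) (fun ch => ch) l0 ≤
      pvKey (fun ch => (PySem.Dict.counter letters).getD ch 0) (fun ch => ch) m :=
    hmax l0 (by rw [PySem.Dict.keys_counter]; exact (PySem.Set.mem_ofList letters l0).2 hl0mem)
  have hcnt : ∀ c : Char, (PySem.Dict.counter letters).getD c 0 = (PySem.List.count letters c : Int) := by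
    intro c
    rw [PySem.Dict.getD_counter, PySem.List.count_eq]
  have h1' : toLex ((PySem.List.count letters m : Int), m) ≤
      toLex ((PySem.List.count letters l0 : Int), l0) := by
    rw [← hl0eq] at h1
    simpa [pvKey] using h1
  have h2' : toLex ((PySem.List.count letters l0 : Int), l0) ≤
      toLex ((PySem.List.count letters m : Int), m) := by
    simpa [pvKey, hcnt] using h2
  have hpair : ((PySem.List.count letters m : Int), m) =
      ((PySem.List.count letters l0 : Int), l0) :=
    toLex.injective (le_antisymm h1' h2')
  rw [← hl0eq]
  exact (congrArg Prod.snd hpair).symm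

-- ===== shape lemmas for the two ports =====
theorem part1_eq_map (puzzle_input : String) :
    part1 puzzle_input = String.ofList
      ((PySem.List.pyRange 0 (PySem.List.len (PySem.List.pyGetD
          (PySem.Chars.splitOn puzzle_input.toList ['\n']) 0 [])) 1).map
        (fun i =>
          (PySem.List.pyGetD
            (PySem.List.sorted2
              (((PySem.Chars.splitOn puzzle_input.toList ['\n']).map
                  (fun line => PySem.List.pyGetD line i ' ')).map
                (fun l => ((PySem.List.count ((PySem.Chars.splitOn puzzle_input.toList ['\n']).map
                  (fun line => PySem.List.pyGetD line i ' ')) l : Int), l)))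
              Prod.fst Prod.snd) (-1) (0, ' ')).2)) := by
  show String.ofList _ = _
  rw [PySem.List.foldl_append_singleton_eq_map, List.nil_append]

-- B's row-major fold, read off column by column
theorem pvFold_getElem? (ls : List (List Char)) :
    ∀ (cs : List (PySem.Dict Char Int)) (j : Nat),
      (ls.foldl (fun counts line =>
          (PySem.List.enumerate counts).map (fun p =>
            p.2.insert (PySem.List.pyGetD line p.1 ' ')
              (p.2.getD (PySem.List.pyGetD line p.1 ' ') 0 + 1))) cs)[j]? =
        cs[j]?.map (fun d => ls.foldl (fun d line =>
          d.insert (PySem.List.pyGetD line (j : Int) ' ')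
            (d.getD (PySem.List.pyGetD line (j : Int) ' ') 0 + 1)) d) := by
  induction ls with
  | nil => intro cs j; simp
  | cons l ls ih =>
    intro cs j
    rw [List.foldl_cons, ih]
    rw [List.getElem?_map, PySem.List.getElem?_enumerate, Option.map_map, Option.map_map]
    rcases cs[j]? with _ | d
    · rfl
    · simp

theorem pvFold_counter (ls : List (List Char)) (i : Int) :
    ls.foldl (fun d line =>
        d.insert (PySem.List.pyGetD line i ' ')
          (d.getD (PySem.List.pyGetD line i ' ') 0 + 1)) PySem.Dict.empty =
      PySem.Dict.counter (ls.map (fun line => PySem.List.pyGetD line i ' ')) := by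
  rw [← PySem.Dict.foldl_insert_getD_add_one_eq_counter, List.foldl_map]

theorem pvFold_eq_map (ls : List (List Char)) (w : Int) :
    ls.foldl (fun counts line =>
        (PySem.List.enumerate counts).map (fun p =>
          p.2.insert (PySem.List.pyGetD line p.1 ' ')
            (p.2.getD (PySem.List.pyGetD line p.1 ' ') 0 + 1)))
      ((PySem.List.pyRange 0 w 1).map (fun _ => PySem.Dict.empty)) =
      (PySem.List.pyRange 0 w 1).map (fun i =>
        PySem.Dict.counter (ls.map (fun line => PySem.List.pyGetD line i ' '))) := by
  apply List.ext_getElem?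
  intro j
  rw [pvFold_getElem?, List.getElem?_map, List.getElem?_map, PySem.List.getElem?_pyRange_one]
  split
  · simp only [Option.map_some, Option.some.injEq]
    rw [pvFold_counter]
    norm_num
  · rfl

theorem part1_alt_eq_map (puzzle_input : String) :
    part1_alt puzzle_input = String.ofList
      ((PySem.List.pyRange 0 (PySem.List.len (PySem.List.pyGetD
          (PySem.Chars.splitOn puzzle_input.toList ['\n']) 0 [])) 1).map
        (fun i =>
          (PySem.List.max2?
            (PySem.Dict.counter ((PySem.Chars.splitOn puzzle_input.toList ['\n']).map
              (fun line => PySem.List.pyGetD line i ' '))).keys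
            (fun ch => (PySem.Dict.counter ((PySem.Chars.splitOn puzzle_input.toList ['\n']).map
              (fun line => PySem.List.pyGetD line i ' '))).getD ch 0)
            (fun ch => ch)).getD ' ')) := by
  simp only [part1_alt]
  rw [pvFold_eq_map, List.map_map]
  rfl

-- ===== VERDICT (by name: the statement is the Claim_ definition above) =====
theorem part1_spec : Claim_equal_part1 := by
  intro puzzle_input _ _
  show part1 puzzle_input = part1_alt puzzle_input
  rw [part1_eq_map, part1_alt_eq_map]
  exact congrArg String.ofList (List.map_congr_left (fun i _ => column_eq _))
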